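-- pv_equiv track=rewrite | github.com/agux/faix | pstk/model/model.py | numLayers
-- ===== SOURCE A (Python) =====
-- import math
--
-- def numLayers(d1, d2=None):
--     n1 = 0
--     while d1 > 1:
--         d1 = math.ceil(d1/2.0)
--         n1 += 1
--     n2 = 0
--     if d2 is not None:
--         n2 = numLayers(d2)
--     return max(n1, n2)
-- ===== SOURCE B (Python) =====
-- def _steps(d):
--     # number of ceil-halving steps to bring d down to <= 1: ceil(log2(d)) for d >= 2
--     return 0 if d <= 1 else (d - 1).bit_length()
--
-- def numLayers(d1, d2=None):
--     return max(_steps(d1), _steps(d2) if d2 is not None else 0)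
-- ===== Notes on version B (the rewrite author's own statement) =====
-- stated objective: faster
-- what changed: Replaces the repeated ceil-halving loop (and the recursive call for d2) with a closed-form bit-length computation: steps(d) = (d-1).bit_length() for d >= 2, else 0.
import Mathlib
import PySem

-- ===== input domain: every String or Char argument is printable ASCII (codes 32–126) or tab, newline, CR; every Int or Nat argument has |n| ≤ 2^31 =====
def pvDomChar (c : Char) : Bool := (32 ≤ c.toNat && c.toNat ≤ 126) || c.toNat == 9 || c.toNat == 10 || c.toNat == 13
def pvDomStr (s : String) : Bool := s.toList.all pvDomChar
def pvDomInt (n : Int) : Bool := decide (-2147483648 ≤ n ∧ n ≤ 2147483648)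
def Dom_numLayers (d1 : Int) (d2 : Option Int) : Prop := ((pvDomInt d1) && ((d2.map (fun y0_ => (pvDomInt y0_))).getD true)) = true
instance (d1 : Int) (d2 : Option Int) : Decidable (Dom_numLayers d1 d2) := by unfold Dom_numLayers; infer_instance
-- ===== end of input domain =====

-- B replaces A's ceil-halving while-loop by the closed form (d-1).bit_length() (faster: no loop).


-- ===== PORT A =====
-- A's while-loop: while d1 > 1: d1 = math.ceil(d1/2.0); n1 += 1.  On |d| ≤ 2^31 the float
-- division is exact, so math.ceil(d/2.0) = -((-d) // 2); the loop returns the step count.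
def pyLoopA (d : Int) : Int :=
  if h : 1 < d then
    pyLoopA (-(PySem.Int.floordiv (-d) 2)) + 1
  else 0
termination_by d.toNat
decreasing_by
  have hf : Int.fdiv (-d) 2 = (-d) / 2 := by rw [Int.fdiv_eq_ediv]; simp
  simp only [PySem.Int.floordiv, hf]
  omega

-- A's recursive call numLayers(d2): with d2=None it returns max(n1, 0).
def pyNumLayers1 (d : Int) : Int := max (pyLoopA d) 0

def numLayers (d1 : Int) (d2 : Option Int) : Int :=
  let n1 := pyLoopA d1
  let n2 := match d2 with
    | none => 0
    | some d => pyNumLayers1 d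
  max n1 n2

-- ===== PORT B =====
-- B's helper _steps: 0 if d <= 1 else (d-1).bit_length()
def altSteps (d : Int) : Int :=
  if d ≤ 1 then 0 else (PySem.Int.bitLength (d - 1) : Int)

def numLayers_alt (d1 : Int) (d2 : Option Int) : Int :=
  max (altSteps d1) (match d2 with | none => 0 | some d => altSteps d)

-- ===== PRECONDITION & SPEC =====
def Spec_numLayers (d1 : Int) (d2 : Option Int) (out : Int) : Prop := out = numLayers_alt d1 d2
instance (d1 : Int) (d2 : Option Int) (out : Int) : Decidable (Spec_numLayers d1 d2 out) := by unfold Spec_numLayers; infer_instance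

-- ===== CLAIM (what is proved, stated in full; the proofs are below) =====
def Claim_equal_numLayers : Prop := ∀ (d1 : Int) (d2 : Option Int), Dom_numLayers d1 d2 → Spec_numLayers d1 d2 (numLayers d1 d2)

-- ===== LEMMAS AND PROOFS =====

lemma pyLoopA_eq_altSteps (d : Int) : pyLoopA d = altSteps d := by
  by_cases h1 : 1 < d
  · -- strong induction on d.toNat
    induction hn : d.toNat using Nat.strong_induction_on generalizing d with
    | _ n ih =>
      rw [pyLoopA.eq_def]
      simp only [h1, dif_pos]
      have hfd : PySem.Int.floordiv (-d) 2 = (-d) / 2 := by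
        simp only [PySem.Int.floordiv]
        rw [Int.fdiv_eq_ediv]; simp
      set c : Int := -((-d) / 2) with hc
      have hc2 : c = (d + 1) / 2 := by omega
      have hcge : 1 ≤ c := by omega
      have hclt : c < d := by omega
      by_cases hcle : c ≤ 1
      · -- c = 1, so d = 2
        have hd2 : d = 2 := by omega
        subst hd2
        rw [pyLoopA.eq_def]
        simp only [altSteps]
        decide
      · have hrec := ih c.toNat (by omega) c (by omega) rfl
        rw [hfd, ← hc, hrec]
        simp only [altSteps, if_neg hcle, if_neg (by omega : ¬ d ≤ 1)]
        have hpos : 0 < d - 1 := by omega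
        rw [PySem.Int.bitLength_of_pos hpos]
        have : PySem.Int.floordiv (d - 1) 2 = c - 1 := by
          simp only [PySem.Int.floordiv]
          rw [Int.fdiv_eq_ediv]
          simp; omega
        rw [this]
        push_cast
        ring
  · have hd : d ≤ 1 := by omega
    rw [pyLoopA.eq_def]
    simp [altSteps, h1, hd]

lemma altSteps_nonneg (d : Int) : 0 ≤ altSteps d := by
  unfold altSteps
  split <;> simp

-- ===== VERDICT (by name: the statement is the Claim_ definition above) =====
theorem numLayers_spec : Claim_equal_numLayers := by
  intro d1 d2 _
  show numLayers d1 d2 = numLayers_alt d1 d2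
  unfold numLayers numLayers_alt pyNumLayers1
  cases d2 with
  | none => simp [pyLoopA_eq_altSteps]
  | some d =>
    simp only [pyLoopA_eq_altSteps]
    rw [max_eq_left (altSteps_nonneg d)]
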